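-- pv_equiv track=rewrite | github.com/jhsuwm/sprint2code | backend/agents/validation_manager.py | _detect_runtime_error
-- ===== SOURCE A (Python) =====
-- from typing import Dict, Any, List, Optional
--
-- def _detect_runtime_error(logs: list, service_type: str) -> Optional[str]:
--     """
--     STEP 2: Detect runtime errors in container logs
--     Returns error message if found, None otherwise
--     """
--     if not logs:
--         return None
--
--     error_indicators = [
--         "Traceback",
--         "AttributeError",
--         "ImportError",
--         "ModuleNotFoundError",
--         "NameError",
--         "TypeError",
--         "ValueError",
--         "SyntaxError",
--         "RuntimeError",
--         "Exception:",
--         "Error:",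
--         "CRITICAL",
--         "Container called exit(1)",
--         "failed to start"
--     ]
--
--     error_lines = []
--     for log in logs:
--         log_str = str(log)
--         # Check if log contains error indicators
--         if any(indicator in log_str for indicator in error_indicators):
--             error_lines.append(log_str)
--
--     if error_lines:
--         # Extract the most relevant error information
--         error_msg = "\n".join(error_lines[:10])  # First 10 error lines
--
--         # Try to extract the root cause
--         for line in error_lines:
--             if "AttributeError:" in line or "ImportError:" in line or "ModuleNotFoundError:" in line:
--                 # This is likely the root cause
--                 return line.strip()
--
--         # Return first error if no specific root cause found
--         return error_lines[0].strip() if error_lines else error_msg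
--
--     return None
-- ===== SOURCE B (Python) =====
-- from typing import Optional
--
-- _ERROR_INDICATORS = (
--     "Traceback", "AttributeError", "ImportError", "ModuleNotFoundError",
--     "NameError", "TypeError", "ValueError", "SyntaxError", "RuntimeError",
--     "Exception:", "Error:", "CRITICAL", "Container called exit(1)",
--     "failed to start",
-- )
--
-- _ROOT_CAUSE = ("AttributeError:", "ImportError:", "ModuleNotFoundError:")
--
--
-- def _detect_runtime_error(logs: list, service_type: str) -> Optional[str]:
--     """Single pass: track the first error line; return at the first root cause."""
--     first_error = None
--     for log in logs:
--         log_str = str(log)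
--         if first_error is None and any(ind in log_str for ind in _ERROR_INDICATORS):
--             first_error = log_str
--         if any(rc in log_str for rc in _ROOT_CAUSE):
--             return log_str.strip()
--     return first_error.strip() if first_error is not None else None
-- ===== Notes on version B (the rewrite author's own statement) =====
-- stated objective: simpler
-- what changed: Replaces A's build-a-filtered-list-then-rescan structure (plus its dead error_msg join) with one pass over the logs maintaining two running candidates (first error line, first root-cause line), returning early at the first root cause.
import Mathlib
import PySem

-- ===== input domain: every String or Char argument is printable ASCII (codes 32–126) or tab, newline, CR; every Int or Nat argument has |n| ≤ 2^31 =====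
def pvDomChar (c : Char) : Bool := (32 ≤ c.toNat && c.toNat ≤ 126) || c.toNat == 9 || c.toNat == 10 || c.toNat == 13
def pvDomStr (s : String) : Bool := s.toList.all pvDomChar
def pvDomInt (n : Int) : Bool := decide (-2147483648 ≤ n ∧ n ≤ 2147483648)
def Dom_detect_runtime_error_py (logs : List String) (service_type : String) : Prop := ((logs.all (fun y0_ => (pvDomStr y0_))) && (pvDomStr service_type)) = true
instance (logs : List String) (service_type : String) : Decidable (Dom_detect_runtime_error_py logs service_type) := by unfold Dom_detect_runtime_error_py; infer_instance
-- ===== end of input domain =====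

-- B replaces A's build-filtered-list-then-two-scans with one pass keeping two running candidates (simpler; same cost).


-- ===== PORT A =====
def pvIndicators : List String :=
  ["Traceback", "AttributeError", "ImportError", "ModuleNotFoundError",
   "NameError", "TypeError", "ValueError", "SyntaxError", "RuntimeError",
   "Exception:", "Error:", "CRITICAL", "Container called exit(1)",
   "failed to start"]

def pvIsErr (s : String) : Bool := pvIndicators.any (fun ind => PySem.Str.isIn ind s)

def pvIsRoot (s : String) : Bool :=
  PySem.Str.isIn "AttributeError:" s || PySem.Str.isIn "ImportError:" s ||
  PySem.Str.isIn "ModuleNotFoundError:" s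

def detect_runtime_error_py (logs : List String) (service_type : String) : Option String :=
  if logs = [] then none
  else
    let error_lines := logs.foldl (fun acc log => if pvIsErr log then acc ++ [log] else acc) []
    if error_lines ≠ [] then
      let error_msg := PySem.Str.join "\n" (PySem.List.slice error_lines none (some 10))
      match error_lines.find? pvIsRoot with
      | some line => some (PySem.Str.strip line)
      | none =>
        if error_lines ≠ [] then some (PySem.Str.strip (PySem.List.pyGetD error_lines 0 ""))
        else some error_msg
    else none

-- ===== PORT B =====
def pvRootCause : List String := ["AttributeError:", "ImportError:", "ModuleNotFoundError:"]

def detect_runtime_error_py_altGo : List String → Option String → Option String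
  | [], firstError => firstError.map PySem.Str.strip
  | log :: rest, firstError =>
    let firstError' :=
      if firstError = none ∧ pvIndicators.any (fun ind => PySem.Str.isIn ind log) then some log
      else firstError
    if pvRootCause.any (fun rc => PySem.Str.isIn rc log) then some (PySem.Str.strip log)
    else detect_runtime_error_py_altGo rest firstError'

def detect_runtime_error_py_alt (logs : List String) (service_type : String) : Option String :=
  detect_runtime_error_py_altGo logs none

-- ===== PRECONDITION & SPEC =====
def Spec_detect_runtime_error_py (logs : List String) (service_type : String) (out : Option String) : Prop := out = detect_runtime_error_py_alt logs service_type
instance (logs : List String) (service_type : String) (out : Option String) : Decidable (Spec_detect_runtime_error_py logs service_type out) := by unfold Spec_detect_runtime_error_py; infer_instance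

-- ===== CLAIM (what is proved, stated in full; the proofs are below) =====
def Claim_equal_detect_runtime_error_py : Prop := ∀ (logs : List String) (service_type : String), Dom_detect_runtime_error_py logs service_type → Spec_detect_runtime_error_py logs service_type (detect_runtime_error_py logs service_type)

-- ===== LEMMAS AND PROOFS =====

-- B's root-cause test is A's pvIsRoot.
lemma root_any_eq (s : String) : pvRootCause.any (fun rc => PySem.Str.isIn rc s) = pvIsRoot s := by
  simp [pvRootCause, pvIsRoot, Bool.or_assoc]

-- one unfolding step of B's loop, phrased with A's predicates
lemma altGo_cons (l : String) (rest : List String) (fe : Option String) :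
    detect_runtime_error_py_altGo (l :: rest) fe =
      if pvIsRoot l = true then some (PySem.Str.strip l)
      else detect_runtime_error_py_altGo rest
        (if fe = none ∧ pvIsErr l = true then some l else fe) := by
  rw [detect_runtime_error_py_altGo, root_any_eq]
  rfl

-- a root-cause line always carries an error indicator
lemma isErr_of_isRoot {s : String} (h : pvIsRoot s = true) : pvIsErr s = true := by
  unfold pvIsRoot at h
  rcases Bool.or_eq_true_iff.mp h with h | h
  · rcases Bool.or_eq_true_iff.mp h with h | h
    · refine List.any_eq_true.mpr ⟨"AttributeError", by simp [pvIndicators], ?_⟩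
      rw [PySem.Str.isIn_eq] at h ⊢
      exact (PySem.Chars.isIn_iff_infix _ _).mpr
        (List.IsInfix.trans (by decide) ((PySem.Chars.isIn_iff_infix _ _).mp h))
    · refine List.any_eq_true.mpr ⟨"ImportError", by simp [pvIndicators], ?_⟩
      rw [PySem.Str.isIn_eq] at h ⊢
      exact (PySem.Chars.isIn_iff_infix _ _).mpr
        (List.IsInfix.trans (by decide) ((PySem.Chars.isIn_iff_infix _ _).mp h))
  · refine List.any_eq_true.mpr ⟨"ModuleNotFoundError", by simp [pvIndicators], ?_⟩
    rw [PySem.Str.isIn_eq] at h ⊢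
    exact (PySem.Chars.isIn_iff_infix _ _).mpr
      (List.IsInfix.trans (by decide) ((PySem.Chars.isIn_iff_infix _ _).mp h))

-- characterisation of B's loop in terms of A's filtered list
lemma altGo_eq (logs : List String) (fe : Option String) :
    detect_runtime_error_py_altGo logs fe =
      match (logs.filter pvIsErr).find? pvIsRoot with
      | some l => some (PySem.Str.strip l)
      | none =>
        match fe with
        | some f => some (PySem.Str.strip f)
        | none => ((logs.filter pvIsErr).head?).map PySem.Str.strip := by
  induction logs generalizing fe with
  | nil => cases fe <;> simp [detect_runtime_error_py_altGo]
  | cons l rest ih =>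
    rw [altGo_cons]
    by_cases hr : pvIsRoot l = true
    · rw [if_pos hr, List.filter_cons_of_pos (isErr_of_isRoot hr), List.find?_cons_of_pos hr]
    · rw [if_neg (by simp [hr])]
      have hr' : pvIsRoot l = false := by simpa using hr
      by_cases he : pvIsErr l = true
      · rw [ih, List.filter_cons_of_pos he, List.find?_cons_of_neg (by simp [hr'])]
        cases fe with
        | some f => rw [if_neg (by simp)]
        | none =>
          rw [if_pos ⟨rfl, he⟩]
          cases hf : (rest.filter pvIsErr).find? pvIsRoot <;> simp
      · have he' : pvIsErr l = false := by simpa using he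
        rw [List.filter_cons_of_neg (by simp [he']), ih]
        have hfe : (if fe = none ∧ pvIsErr l = true then some l else fe) = fe := by
          cases fe <;> simp [he']
        rw [hfe]

-- A's accumulating foldl builds exactly the filter
lemma errLines_eq (logs : List String) :
    logs.foldl (fun acc log => if pvIsErr log then acc ++ [log] else acc) [] =
      logs.filter pvIsErr := by
  simpa using PySem.List.foldl_append_if pvIsErr id logs []

-- ===== VERDICT (by name: the statement is the Claim_ definition above) =====
theorem detect_runtime_error_py_spec : Claim_equal_detect_runtime_error_py := by
  intro logs service_type _
  unfold Spec_detect_runtime_error_py detect_runtime_error_py detect_runtime_error_py_alt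
  rw [altGo_eq, errLines_eq]
  cases logs with
  | nil => rfl
  | cons a as =>
    rw [if_neg (by simp)]
    by_cases hel : (a :: as).filter pvIsErr = []
    · simp [hel]
    · rw [if_pos hel]
      cases hf : ((a :: as).filter pvIsErr).find? pvIsRoot with
      | some l => rfl
      | none =>
        obtain ⟨e, es, hcons⟩ := List.exists_cons_of_ne_nil hel
        rw [hcons]
        simp [PySem.List.pyGetD_zero_cons]
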